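-- pv_equiv track=rewrite | github.com/nishio/atcoder | libs/iterate_all_subset.py | sum_for_all_subset_grey_devel
-- ===== SOURCE A (Python) =====
-- def ctz_naive(x, w=16):
--     """
--     counting zeros starting at the LSB until a 1-bit is encountered
--     """
--     if x == 0:
--         return w
--     t = 1
--     r = 0
--     while x & t == 0:
--         t <<= 1
--         r += 1
--     return r
--
-- def to_graycode(x):
--     return x ^ (x >> 1)
--
-- def sum_for_all_subset_grey_devel(XS):
--     N = len(XS)
--     ret = [0]
--     # init
--     s = 0
--     for i in range(1, 2 ** N):
--         g = to_graycode(i)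
--         mask = to_graycode(i) ^ to_graycode(i - 1)
--         j = ctz_naive(mask)
--         if g & mask:
--             s += XS[j]
--         else:
--             s -= XS[j]
--         # do sth on result
--         ret.append(s)
--     return ret
-- ===== SOURCE B (Python) =====
-- def sum_for_all_subset_grey_devel(XS):
--     ret = []
--     for i in range(2 ** len(XS)):
--         g = i ^ (i >> 1)
--         total = 0
--         for j in range(len(XS)):
--             if (g >> j) & 1:
--                 total += XS[j]
--         ret.append(total)
--     return ret
-- ===== Notes on version B (the rewrite author's own statement) =====
-- stated objective: simpler
-- what changed: B drops the incremental gray-code state machine (running sum, neighbour mask, trailing-zero count) and recomputes each entry independently as the plain sum of XS[j] over the set bits of the gray code i^(i>>1).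
import Mathlib
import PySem

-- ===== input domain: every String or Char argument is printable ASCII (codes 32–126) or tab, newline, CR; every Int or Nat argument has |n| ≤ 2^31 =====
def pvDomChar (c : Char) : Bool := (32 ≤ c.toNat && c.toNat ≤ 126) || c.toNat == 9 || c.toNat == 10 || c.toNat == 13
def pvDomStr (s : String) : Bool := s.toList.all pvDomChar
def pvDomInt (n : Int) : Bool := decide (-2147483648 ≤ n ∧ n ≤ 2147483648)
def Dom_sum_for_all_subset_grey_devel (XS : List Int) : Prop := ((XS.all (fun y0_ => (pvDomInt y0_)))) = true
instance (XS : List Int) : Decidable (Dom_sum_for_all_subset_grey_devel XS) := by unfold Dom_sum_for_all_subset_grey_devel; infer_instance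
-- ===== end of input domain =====

-- B drops A's incremental gray-code state machine (running sum, neighbour mask, trailing-zero
-- count) and recomputes each entry independently as the sum of XS[j] over the set bits of the
-- gray code i ^ (i >> 1); objective: simpler.

-- ===== PORT A =====
-- while loop of ctz_naive, fuel-guarded for totality only: for x ≠ 0 the loop runs
-- ctz(x) < x times, so fuel = x is never exhausted and the port is exact.
def ctzLoop : Nat → Nat → Nat → Nat → Nat
  | 0, _, _, r => r
  | fuel+1, x, t, r => if x &&& t = 0 then ctzLoop fuel x (t <<< 1) (r+1) else r

def ctz_naive (x : Nat) (w : Nat) : Nat :=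
  if x = 0 then w else ctzLoop x x 1 0

def to_graycode (x : Nat) : Nat := x ^^^ (x >>> 1)

-- loop indices i of range(1, 2**N) are nonnegative Python ints, ported as Nat;
-- XS[j] is ported as getD (j is provably in range, so Python never raises here).
def sum_for_all_subset_grey_devel (XS : List Int) : List Int :=
  -- N = len(XS) inlined as XS.length
  ((List.range' 1 (2 ^ XS.length - 1)).foldl
    (fun (st : Int × List Int) i =>
      let g := to_graycode i
      let mask := to_graycode i ^^^ to_graycode (i - 1)
      let j := ctz_naive mask 16
      let s := if g &&& mask ≠ 0 then st.1 + XS.getD j 0 else st.1 - XS.getD j 0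
      (s, st.2 ++ [s]))
    (0, [0])).2

-- ===== PORT B =====
-- inner loop of Source B: total = 0; for j in range(len(XS)): if (g >> j) & 1: total += XS[j]
def graySubsetSum (XS : List Int) (g : Nat) : Int :=
  (List.range XS.length).foldl
    (fun t j => if (g >>> j) &&& 1 ≠ 0 then t + XS.getD j 0 else t) 0

def sum_for_all_subset_grey_devel_alt (XS : List Int) : List Int :=
  (List.range (2 ^ XS.length)).map (fun i => graySubsetSum XS (i ^^^ (i >>> 1)))

-- ===== PRECONDITION & SPEC =====
def Spec_sum_for_all_subset_grey_devel (XS : List Int) (out : List Int) : Prop := out = sum_for_all_subset_grey_devel_alt XS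
instance (XS : List Int) (out : List Int) : Decidable (Spec_sum_for_all_subset_grey_devel XS out) := by unfold Spec_sum_for_all_subset_grey_devel; infer_instance

-- ===== CLAIM (what is proved, stated in full; the proofs are below) =====
def Claim_equal_sum_for_all_subset_grey_devel : Prop := ∀ (XS : List Int), Dom_sum_for_all_subset_grey_devel XS → Spec_sum_for_all_subset_grey_devel XS (sum_for_all_subset_grey_devel XS)

-- ===== LEMMAS AND PROOFS =====

theorem foldl_range_sum (f : Nat → Int) : ∀ (n : Nat) (a : Int),
    (List.range n).foldl (fun t j => t + f j) a = a + ∑ j ∈ Finset.range n, f j := by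
  intro n
  induction n with
  | zero => simp
  | succ n ih =>
      intro a
      rw [List.range_succ, List.foldl_append, ih, Finset.sum_range_succ]
      simp
      ring

theorem graySubsetSum_eq (XS : List Int) (g : Nat) :
    graySubsetSum XS g
      = ∑ j ∈ Finset.range XS.length, if g.testBit j then XS.getD j 0 else 0 := by
  unfold graySubsetSum
  have h : (fun (t : Int) (j : Nat) => if (g >>> j) &&& 1 ≠ 0 then t + XS.getD j 0 else t)
      = fun (t : Int) (j : Nat) => t + (if g.testBit j then XS.getD j 0 else 0) := by
    funext t j
    have hbit : ((g >>> j) &&& 1 ≠ 0) ↔ g.testBit j = true := by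
      simp [Nat.testBit, Nat.and_comm]
    split_ifs with h1 h2 h2 <;> simp_all
  rw [h, foldl_range_sum]
  simp

theorem graySubsetSum_flip (XS : List Int) (g k : Nat) (hk : k < XS.length) :
    graySubsetSum XS (g ^^^ 2^k)
      = if (g ^^^ 2^k).testBit k then graySubsetSum XS g + XS.getD k 0
        else graySubsetSum XS g - XS.getD k 0 := by
  rw [graySubsetSum_eq, graySubsetSum_eq]
  have hmem : k ∈ Finset.range XS.length := Finset.mem_range.mpr hk
  rw [← Finset.add_sum_erase _ _ hmem, ← Finset.add_sum_erase _ _ hmem]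
  have hrest : ∑ j ∈ (Finset.range XS.length).erase k, (if (g ^^^ 2^k).testBit j then XS.getD j 0 else 0)
      = ∑ j ∈ (Finset.range XS.length).erase k, (if g.testBit j then XS.getD j 0 else 0) := by
    refine Finset.sum_congr rfl ?_
    intro j hj
    have hne : j ≠ k := (Finset.mem_erase.mp hj).1
    have hb : (g ^^^ 2^k).testBit j = g.testBit j := by
      have hd : decide (k = j) = false := by simp [Ne.symm hne]
      rw [Nat.testBit_xor, Nat.testBit_two_pow, hd, Bool.xor_false]
    rw [hb]
  have hk2 : (g ^^^ 2^k).testBit k = !g.testBit k := by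
    simp [Nat.testBit_xor, Nat.testBit_two_pow]
  rw [hrest, hk2]
  cases hgk : g.testBit k <;> simp [hgk] <;> ring

theorem xor_pred (k m : Nat) :
    ((2^(k+1)*m + 2^k) ^^^ (2^(k+1)*m + 2^k - 1)) = 2^(k+1) - 1 := by
  have h1 : (1:Nat) ≤ 2^k := Nat.one_le_two_pow
  have hb : (2^k : Nat) < 2^(k+1) := by
    have : (2:Nat)^k * 1 < 2^k * 2 := by omega
    calc (2^k : Nat) = 2^k * 1 := by ring
    _ < 2^k * 2 := this
    _ = 2^(k+1) := by ring
  have e : 2^(k+1)*m + 2^k - 1 = 2^(k+1)*m + (2^k - 1) := by omega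
  apply Nat.eq_of_testBit_eq
  intro j
  have hb' : (2^k - 1 : Nat) < 2^(k+1) := by omega
  rw [e, Nat.testBit_xor, Nat.testBit_two_pow_mul_add _ hb, Nat.testBit_two_pow_mul_add _ hb',
      Nat.testBit_two_pow_sub_one, Nat.testBit_two_pow_sub_one]
  by_cases hj : j < k+1
  · by_cases hjk : k = j <;> simp [hj, hjk, Nat.testBit_two_pow] <;> omega
  · simp [hj]

theorem gray_xor (k m : Nat) :
    to_graycode (2^(k+1)*m + 2^k) ^^^ to_graycode (2^(k+1)*m + 2^k - 1) = 2^k := by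
  have hd := xor_pred k m
  apply Nat.eq_of_testBit_eq
  intro j
  have hre : (to_graycode (2^(k+1)*m + 2^k) ^^^ to_graycode (2^(k+1)*m + 2^k - 1)).testBit j
      = (((2^(k+1)*m + 2^k) ^^^ (2^(k+1)*m + 2^k - 1)).testBit j
          ^^ ((2^(k+1)*m + 2^k) ^^^ (2^(k+1)*m + 2^k - 1)).testBit (1+j)) := by
    simp only [to_graycode, Nat.testBit_xor, Nat.testBit_shiftRight]
    cases (2^(k+1)*m + 2^k).testBit j <;> cases (2^(k+1)*m + 2^k).testBit (1+j) <;>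
      cases (2^(k+1)*m + 2^k - 1).testBit j <;> cases (2^(k+1)*m + 2^k - 1).testBit (1+j) <;> rfl
  rw [hre, hd, Nat.testBit_two_pow_sub_one, Nat.testBit_two_pow_sub_one, Nat.testBit_two_pow]
  by_cases h1 : j < k+1 <;> by_cases h2 : 1+j < k+1 <;> by_cases h3 : k = j <;>
    simp [h1, h2, h3] <;> omega

theorem exists_ctz : ∀ i : Nat, i ≠ 0 → ∃ k m, i = 2^(k+1)*m + 2^k := by
  intro i
  induction i using Nat.strong_induction_on with
  | _ i ih =>
    intro hi
    rcases Nat.even_or_odd i with he | ho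
    · obtain ⟨a, ha⟩ := he
      obtain ⟨k, m, hkm⟩ := ih a (by omega) (by omega)
      refine ⟨k+1, m, ?_⟩
      have : i = 2 * a := by omega
      rw [this, hkm]
      ring
    · obtain ⟨a, ha⟩ := ho
      refine ⟨0, a, ?_⟩
      simp [pow_one, pow_zero]
      omega

theorem ctzLoop_pow : ∀ (d r fuel : Nat), d ≤ fuel → ctzLoop fuel (2^(r+d)) (2^r) r = r + d := by
  intro d
  induction d with
  | zero =>
      intro r fuel _
      cases fuel with
      | zero => simp [ctzLoop]
      | succ f =>
          have hne : (2:Nat)^(r+0) &&& 2^r ≠ 0 := by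
            rw [Nat.and_two_pow, Nat.testBit_two_pow]
            simp
          simp [ctzLoop, hne]
  | succ d ih =>
      intro r fuel hf
      cases fuel with
      | zero => omega
      | succ f =>
          have hz : (2:Nat)^(r+(d+1)) &&& 2^r = 0 := by
            rw [Nat.and_two_pow, Nat.testBit_two_pow]
            simp
          have hsh : (2:Nat)^r <<< 1 = 2^(r+1) := by
            rw [Nat.shiftLeft_eq]
            ring
          have harg : r + (d+1) = (r+1) + d := by omega
          simp only [ctzLoop, hz, eq_self_iff_true, if_true, hsh]
          rw [harg, ih (r+1) f (by omega)]

theorem ctz_naive_pow (k : Nat) : ctz_naive (2^k) 16 = k := by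
  have hne : (2:Nat)^k ≠ 0 := by positivity
  unfold ctz_naive
  rw [if_neg hne]
  have h1 : (1:Nat) = 2^0 := rfl
  have hk : k < 2^k := Nat.lt_two_pow_self
  rw [h1]
  have := ctzLoop_pow k 0 (2^k) (by omega)
  simpa using this

-- one loop iteration of A, seen through graySubsetSum
theorem step_eq (XS : List Int) (i : Nat) (hi1 : 1 ≤ i) (hi2 : i < 2 ^ XS.length) :
    graySubsetSum XS (to_graycode i)
      = (if to_graycode i &&& (to_graycode i ^^^ to_graycode (i-1)) ≠ 0
          then graySubsetSum XS (to_graycode (i-1)) + XS.getD (ctz_naive (to_graycode i ^^^ to_graycode (i-1)) 16) 0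
          else graySubsetSum XS (to_graycode (i-1)) - XS.getD (ctz_naive (to_graycode i ^^^ to_graycode (i-1)) 16) 0) := by
  obtain ⟨k, m, hkm⟩ := exists_ctz i (by omega)
  have hmask : to_graycode i ^^^ to_graycode (i-1) = 2^k := by rw [hkm]; exact gray_xor k m
  have hgi : to_graycode i = to_graycode (i-1) ^^^ 2^k := by
    rw [← hmask]
    rw [Nat.xor_comm (to_graycode i)]
    rw [Nat.xor_xor_cancel_left]
  have hklt : k < XS.length := by
    have h2k : (2:Nat)^k ≤ i := by
      have : (1:Nat) ≤ 2^(k+1)*m + 1 := by omega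
      calc (2:Nat)^k ≤ 2^(k+1)*m + 2^k := by omega
      _ = i := hkm.symm
    have : (2:Nat)^k < 2^XS.length := lt_of_le_of_lt h2k hi2
    exact (Nat.pow_lt_pow_iff_right (by omega)).mp this
  rw [hmask, ctz_naive_pow]
  have hcond : (to_graycode i &&& 2^k ≠ 0) ↔ (to_graycode i).testBit k = true := by
    rw [Nat.and_two_pow]
    cases (to_graycode i).testBit k <;> simp
  by_cases hc : (to_graycode i).testBit k = true
  · rw [if_pos (hcond.mpr hc)]
    rw [hgi] at hc ⊢
    rw [graySubsetSum_flip XS _ k hklt, if_pos hc]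
  · rw [if_neg (fun h => hc (hcond.mp h))]
    rw [hgi] at hc ⊢
    rw [graySubsetSum_flip XS _ k hklt, if_neg hc]

theorem graySubsetSum_zero (XS : List Int) : graySubsetSum XS 0 = 0 := by
  rw [graySubsetSum_eq]
  simp

theorem loop_inv (XS : List Int) : ∀ n, n < 2 ^ XS.length →
    (List.range' 1 n).foldl
      (fun (st : Int × List Int) i =>
        let g := to_graycode i
        let mask := to_graycode i ^^^ to_graycode (i - 1)
        let j := ctz_naive mask 16
        let s := if g &&& mask ≠ 0 then st.1 + XS.getD j 0 else st.1 - XS.getD j 0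
        (s, st.2 ++ [s]))
      (0, [0])
    = (graySubsetSum XS (to_graycode n),
       (List.range (n+1)).map (fun i => graySubsetSum XS (to_graycode i))) := by
  intro n
  induction n with
  | zero =>
      intro _
      simp [to_graycode, graySubsetSum_zero]
  | succ n ih =>
      intro hlt
      have hcat : List.range' 1 (n+1) = List.range' 1 n ++ [n+1] := by
        rw [List.range'_concat]
        simp [Nat.add_comm]
      rw [hcat, List.foldl_append, ih (by omega)]
      have hstep := step_eq XS (n+1) (by omega) hlt
      simp only [List.foldl_cons, List.foldl_nil]
      simp only [Nat.add_sub_cancel] at hstep ⊢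
      rw [← hstep, List.range_succ (n := n+1), List.map_append]
      rfl

-- ===== VERDICT (by name: the statement is the Claim_ definition above) =====
theorem sum_for_all_subset_grey_devel_spec : Claim_equal_sum_for_all_subset_grey_devel := by
  intro XS _
  unfold Spec_sum_for_all_subset_grey_devel sum_for_all_subset_grey_devel sum_for_all_subset_grey_devel_alt
  have hpos : 1 ≤ 2 ^ XS.length := Nat.one_le_two_pow
  have hn : 2 ^ XS.length - 1 < 2 ^ XS.length := by omega
  rw [loop_inv XS (2 ^ XS.length - 1) hn]
  have : 2 ^ XS.length - 1 + 1 = 2 ^ XS.length := by omega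
  rw [this]
  rfl
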